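-- pv_equiv track=rewrite | github.com/alexandraback/datacollection | solutions_5706278382862336_1/Python/killerrex/problem_a.py | ancestors_elf
-- ===== SOURCE A (Python) =====
-- def ancestors_elf(q):
--     """
--     Find the number D=2^n such that q*D=2^40
--     return p*D
--     """
--     # Calculate the factors of q
--     r = 0
--     for k in range(40):
--         if r != 0:
--             # Not possible
--             return None
--         if q == 1:
--             return 40 - k
--         q, r = divmod(q, 2)
-- ===== SOURCE B (Python) =====
-- _TABLE = {2 ** k: 40 - k for k in range(40)}
--
--
-- def ancestors_elf(q):
--     """
--     Find the number D=2^n such that q*D=2^40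
--     return p*D
--     """
--     return _TABLE.get(q)
-- ===== Notes on version B (the rewrite author's own statement) =====
-- stated objective: simpler
-- what changed: Replaces the 40-step repeated-halving loop with a precomputed dict mapping each power of two 2**k (k<40) to 40-k, so the body is a single table lookup.
import Mathlib
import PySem

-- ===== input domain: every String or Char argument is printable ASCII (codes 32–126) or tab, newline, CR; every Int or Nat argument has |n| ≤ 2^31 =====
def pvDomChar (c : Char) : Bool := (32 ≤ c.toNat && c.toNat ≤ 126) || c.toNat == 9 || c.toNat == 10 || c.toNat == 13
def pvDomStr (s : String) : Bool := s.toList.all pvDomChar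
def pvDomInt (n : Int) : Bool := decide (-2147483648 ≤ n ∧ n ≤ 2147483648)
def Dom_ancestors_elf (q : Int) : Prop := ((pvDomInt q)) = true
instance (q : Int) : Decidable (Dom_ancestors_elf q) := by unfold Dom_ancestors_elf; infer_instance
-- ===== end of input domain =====

-- B replaces A's 40-step repeated-halving loop by a dict precomputed once mapping 2^k to 40-k and a single lookup (objective: simpler).

-- ===== PORT A =====
-- the `for k in range(40)` loop with state (q, r) and early returns
def ancestorsLoop : Int → Int → List Int → Option Int
  | _, _, [] => none
  | q, r, k :: ks =>
    if r ≠ 0 then none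
    else if q = 1 then some (40 - k)
    else ancestorsLoop (PySem.Int.floordiv q 2) (PySem.Int.mod q 2) ks

def ancestors_elf (q : Int) : Option Int :=
  ancestorsLoop q 0 (PySem.List.pyRange 0 40 1)

-- ===== PORT B =====
-- _TABLE = {2 ** k: 40 - k for k in range(40)}  (2 ** k ported as 2 ^ k.toNat; k ∈ range(40) is nonnegative)
def ancestors_elf_table : PySem.Dict Int Int :=
  (PySem.List.pyRange 0 40 1).foldl (fun d k => d.insert (2 ^ k.toNat) (40 - k)) PySem.Dict.empty

def ancestors_elf_alt (q : Int) : Option Int :=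
  ancestors_elf_table.get? q

-- ===== PRECONDITION & SPEC =====
def Spec_ancestors_elf (q : Int) (out : Option Int) : Prop := out = ancestors_elf_alt q
instance (q : Int) (out : Option Int) : Decidable (Spec_ancestors_elf q out) := by unfold Spec_ancestors_elf; infer_instance

-- ===== CLAIM (what is proved, stated in full; the proofs are below) =====
def Claim_equal_ancestors_elf : Prop := ∀ (q : Int), Dom_ancestors_elf q → Spec_ancestors_elf q (ancestors_elf q)

-- ===== LEMMAS AND PROOFS =====

-- the table's keys, as a literal list
def pvKList : List Int := [1, 2, 4, 8, 16, 32, 64, 128, 256, 512, 1024, 2048, 4096, 8192, 16384, 32768, 65536, 131072, 262144, 524288, 1048576, 2097152, 4194304, 8388608, 16777216, 33554432, 67108864, 134217728, 268435456, 536870912, 1073741824, 2147483648, 4294967296, 8589934592, 17179869184, 34359738368, 68719476736, 137438953472, 274877906944, 549755813888]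

theorem pv_loop_none (l : List Int) : ∀ q : Int, (∀ j < l.length, q ≠ 2 ^ j) → ancestorsLoop q 0 l = none := by
  induction l with
  | nil => intro q _; rfl
  | cons k ks ih =>
    intro q h
    have h0 : q ≠ 1 := by simpa using h 0 (by simp)
    simp only [ancestorsLoop, ne_eq, not_true_eq_false, if_false, if_neg h0]
    by_cases hm : PySem.Int.mod q 2 = 0
    · rw [hm]
      apply ih
      intro j hj hq2
      have hqe := PySem.Int.floordiv_mul_add_mod q 2
      refine h (j + 1) (by simp only [List.length_cons]; omega) ?_
      rw [pow_succ]
      rw [hq2] at hqe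
      omega
    · cases ks with
      | nil => rfl
      | cons k' ks' =>
        simp only [ancestorsLoop, ne_eq]
        rw [if_pos hm]

-- ===== VERDICT =====
set_option maxRecDepth 16384 in
theorem ancestors_elf_spec : Claim_equal_ancestors_elf := by
  intro q _
  show ancestors_elf q = ancestors_elf_alt q
  by_cases hq : q ∈ pvKList
  · simp only [pvKList, List.mem_cons, List.not_mem_nil, or_false] at hq
    rcases hq with rfl|rfl|rfl|rfl|rfl|rfl|rfl|rfl|rfl|rfl|rfl|rfl|rfl|rfl|rfl|rfl|rfl|rfl|rfl|rfl|rfl|rfl|rfl|rfl|rfl|rfl|rfl|rfl|rfl|rfl|rfl|rfl|rfl|rfl|rfl|rfl|rfl|rfl|rfl|rfl <;> decide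
  · have hA : ancestors_elf q = none := by
      unfold ancestors_elf
      apply pv_loop_none
      intro j hj hq2
      apply hq
      have hlen : (PySem.List.pyRange 0 40 1).length = 40 := by decide
      rw [hlen] at hj
      rw [hq2]
      interval_cases j <;> decide
    have hB : ancestors_elf_alt q = none := by
      unfold ancestors_elf_alt
      rw [PySem.Dict.get?_eq_none_iff_not_mem_keys]
      have hk : ancestors_elf_table.keys = pvKList := by decide
      rw [hk]; exact hq
    rw [hA, hB]
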